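-- pv_equiv track=rewrite | github.com/QinMingge/25fall_nlp_contest | v2_q/3-gen_FT_data/FT_data.py | smart_split_text
-- ===== SOURCE A (Python) =====
-- STOP_TOKENS = ['900', '2662']
--
-- BACKOFF_WINDOW = 200
--
-- def smart_split_text(text, max_len):
--     """
--     复制自 pretrain_data.py 的切分逻辑
--     """
--     if not isinstance(text, str):
--         return []
--
--     words = text.split()
--     total_len = len(words)
--
--     # Case 0: 如果本身就短于 max_len
--     if total_len <= max_len:
--         return [' '.join(words)]
--
--     result = []
--     start = 0
--
--     while start < total_len:
--         remaining_len = total_len - start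
--
--         # === 处理最后一段 ===
--         if remaining_len < max_len:
--             ideal_start = total_len - max_len
--             search_start = ideal_start
--             search_end = min(total_len, ideal_start + BACKOFF_WINDOW)
--
--             smart_start = -1
--             for i in range(search_start, search_end):
--                 if words[i] in STOP_TOKENS:
--                     smart_start = i + 1
--                     break
--
--             if smart_start != -1:
--                 last_segment = words[smart_start:]
--             else:
--                 last_segment = words[-max_len:]
--
--             result.append(' '.join(last_segment))
--             break
--
--         # === 中间段落 ===
--         end = start + max_len
--         chunk = words[start:end]
--
--         search_start = len(chunk) - 1
--         search_end = max(-1, len(chunk) - 1 - BACKOFF_WINDOW)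
--
--         split_idx = -1
--         for i in range(search_start, search_end, -1):
--             if chunk[i] in STOP_TOKENS:
--                 split_idx = i
--                 break
--
--         if split_idx != -1:
--             real_end = start + split_idx + 1
--         else:
--             real_end = end
--
--         result.append(' '.join(words[start:real_end]))
--         start = real_end
--
--     return result
-- ===== SOURCE B (Python) =====
-- STOP_TOKENS = ['900', '2662']
--
-- BACKOFF_WINDOW = 200
--
--
-- def _stop_tables(words):
--     """One pass each way: prev[i] = largest stop index <= i (else -1),
--     nxt[i] = smallest stop index >= i (else len(words))."""
--     prev = []
--     last = -1
--     for i, w in enumerate(words):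
--         if w in STOP_TOKENS:
--             last = i
--         prev.append(last)
--     rev = []
--     nx = len(words)
--     for i in range(len(words) - 1, -1, -1):
--         if words[i] in STOP_TOKENS:
--             nx = i
--         rev.append(nx)
--     nxt = rev[::-1]
--     return prev, nxt
--
--
-- def smart_split_text(text, max_len):
--     if not isinstance(text, str):
--         return []
--
--     words = text.split()
--     total_len = len(words)
--
--     if total_len <= max_len:
--         return [' '.join(words)]
--
--     prev, nxt = _stop_tables(words)
--
--     result = []
--     start = 0
--     while start < total_len:
--         if total_len - start < max_len:
--             ideal_start = total_len - max_len
--             j = nxt[ideal_start]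
--             if j < min(total_len, ideal_start + BACKOFF_WINDOW):
--                 result.append(' '.join(words[j + 1:]))
--             else:
--                 result.append(' '.join(words[total_len - max_len:]))
--             break
--         j = prev[start + max_len - 1]
--         if j >= start + max(0, max_len - BACKOFF_WINDOW):
--             real_end = j + 1
--         else:
--             real_end = start + max_len
--         result.append(' '.join(words[start:real_end]))
--         start = real_end
--     return result
-- ===== Notes on version B (the rewrite author's own statement) =====
-- stated objective: alternative
-- what changed: Replaces A's per-chunk backward/forward scans (up to BACKOFF_WINDOW words re-scanned for every chunk) by two one-pass precomputed tables prev[i]/nxt[i] (nearest stop token at-or-before / at-or-after i), so each chunk boundary is a single O(1) table lookup; Pre_ only excludes max_len <= 0 with a non-empty word list, where A loops forever.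
import Mathlib
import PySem

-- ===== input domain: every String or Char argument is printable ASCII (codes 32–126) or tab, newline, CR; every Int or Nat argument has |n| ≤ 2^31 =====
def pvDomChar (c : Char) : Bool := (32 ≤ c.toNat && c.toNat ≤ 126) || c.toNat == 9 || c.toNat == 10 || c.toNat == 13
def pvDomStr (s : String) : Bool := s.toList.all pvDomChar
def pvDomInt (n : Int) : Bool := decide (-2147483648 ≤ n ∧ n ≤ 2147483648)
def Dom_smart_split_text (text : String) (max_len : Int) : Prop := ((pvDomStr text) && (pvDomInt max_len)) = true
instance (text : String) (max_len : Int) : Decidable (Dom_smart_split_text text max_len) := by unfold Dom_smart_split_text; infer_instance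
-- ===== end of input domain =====

-- B replaces A's per-chunk window scans by two precomputed nearest-stop tables (prev/nxt), one O(1) lookup per chunk.


-- ===== PORT A =====
-- STOP_TOKENS membership (module-level constant shared by both versions)
def pvStop (w : String) : Bool := ["900", "2662"].contains w

-- the while-loop of A; fuel = words.length + 1 bounds the iteration count whenever max_len ≥ 1
def pvAloop (words : List String) (total max_len : Int) : Nat → Int → List String → List String
  | 0, _, result => result
  | fuel+1, start, result =>
    if start < total then
      if total - start < max_len then
        -- final segment
        let ideal_start := total - max_len
        let search_end := min total (ideal_start + 200)
        let smart_start : Int :=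
          match (PySem.List.pyRange ideal_start search_end 1).find?
              (fun i => pvStop (PySem.List.pyGetD words i "")) with
          | some i => i + 1
          | none => -1
        let last_segment :=
          if smart_start != -1 then PySem.List.slice words (some smart_start) none
          else PySem.List.slice words (some (-max_len)) none
        result ++ [PySem.Str.join " " last_segment]
      else
        -- middle chunk
        let end_ := start + max_len
        let chunk := PySem.List.slice words (some start) (some end_)
        let clen : Int := chunk.length
        let split_idx : Int :=
          match (PySem.List.pyRange (clen - 1) (max (-1) (clen - 1 - 200)) (-1)).find?
              (fun i => pvStop (PySem.List.pyGetD chunk i "")) with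
          | some i => i
          | none => -1
        let real_end := if split_idx != -1 then start + split_idx + 1 else end_
        pvAloop words total max_len fuel real_end
          (result ++ [PySem.Str.join " " (PySem.List.slice words (some start) (some real_end))])
    else result

def smart_split_text (text : String) (max_len : Int) : List String :=
  let words := PySem.Str.split₀ text
  let total : Int := words.length
  if total ≤ max_len then [PySem.Str.join " " words]
  else pvAloop words total max_len (words.length + 1) 0 []

-- ===== PORT B =====
-- prev[i] = largest stop-token index ≤ i (else -1): the first loop of _stop_tables
def pvPrevTable (words : List String) : List Int :=
  ((PySem.List.enumerate words 0).foldl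
    (fun (st : Int × List Int) iw =>
      let last := if pvStop iw.2 then iw.1 else st.1
      (last, st.2 ++ [last]))
    (-1, [])).2

-- nxt[i] = smallest stop-token index ≥ i (else len): the backward loop of _stop_tables;
-- rev[::-1] is ported as .reverse (PySem.List.slice?_none_none_neg_one)
def pvNxtTable (words : List String) : List Int :=
  let total : Int := words.length
  (((PySem.List.pyRange (total - 1) (-1) (-1)).foldl
    (fun (st : Int × List Int) i =>
      let nx := if pvStop (PySem.List.pyGetD words i "") then i else st.1
      (nx, st.2 ++ [nx]))
    (total, [])).2).reverse

def pvBloop (words : List String) (prev nxt : List Int) (total max_len : Int) :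
    Nat → Int → List String → List String
  | 0, _, result => result
  | fuel+1, start, result =>
    if start < total then
      if total - start < max_len then
        let ideal_start := total - max_len
        let j := PySem.List.pyGetD nxt ideal_start 0
        if j < min total (ideal_start + 200) then
          result ++ [PySem.Str.join " " (PySem.List.slice words (some (j + 1)) none)]
        else
          result ++ [PySem.Str.join " " (PySem.List.slice words (some (total - max_len)) none)]
      else
        let j := PySem.List.pyGetD prev (start + max_len - 1) 0
        let real_end := if start + max 0 (max_len - 200) ≤ j then j + 1 else start + max_len
        pvBloop words prev nxt total max_len fuel real_end
          (result ++ [PySem.Str.join " " (PySem.List.slice words (some start) (some real_end))])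
    else result

def smart_split_text_alt (text : String) (max_len : Int) : List String :=
  let words := PySem.Str.split₀ text
  let total : Int := words.length
  if total ≤ max_len then [PySem.Str.join " " words]
  else pvBloop words (pvPrevTable words) (pvNxtTable words) total max_len (words.length + 1) 0 []

-- ===== PRECONDITION & SPEC =====
-- Pre_ excludes only max_len ≤ 0 with a non-empty word list: there A's while-loop never
-- advances `start` and Python A loops forever (no return value to match).
def Pre_smart_split_text (text : String) (max_len : Int) : Prop :=
  1 ≤ max_len ∨ ((PySem.Str.split₀ text).length : Int) ≤ max_len ∨ PySem.Str.split₀ text = []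
instance (text : String) (max_len : Int) : Decidable (Pre_smart_split_text text max_len) := by
  unfold Pre_smart_split_text; infer_instance

def pvWitness_smart_split_text : String × Int := ("900 alpha beta 2662 gamma", 2)

def Spec_smart_split_text (text : String) (max_len : Int) (out : List String) : Prop :=
  out = smart_split_text_alt text max_len
instance (text : String) (max_len : Int) (out : List String) : Decidable (Spec_smart_split_text text max_len out) := by
  unfold Spec_smart_split_text; infer_instance

-- ===== CLAIM (what is proved, stated in full; the proofs are below) =====
def Claim_equal_smart_split_text : Prop := ∀ (text : String) (max_len : Int), Dom_smart_split_text text max_len → Pre_smart_split_text text max_len → Spec_smart_split_text text max_len (smart_split_text text max_len)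

-- ===== LEMMAS AND PROOFS =====

def pvLastStop (words : List String) : Nat → Int
  | 0 => -1
  | k+1 => if pvStop (PySem.List.pyGetD words (k : Int) "") then (k : Int) else pvLastStop words k
def pvNextStop (words : List String) (k : Nat) : Int :=
  if h : k < words.length then
    (if pvStop (PySem.List.pyGetD words (k : Int) "") then (k : Int) else pvNextStop words (k+1))
  else (words.length : Int)
termination_by words.length - k

lemma pvLastStop_lt (words : List String) : ∀ k : Nat, pvLastStop words k < k := by
  intro k
  induction k with
  | zero => simp [pvLastStop]
  | succ k ih => simp only [pvLastStop]; split <;> push_cast <;> omega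

lemma pvNextStop_le (words : List String) (k : Nat) (hk : k ≤ words.length) : (k : Int) ≤ pvNextStop words k := by
  rw [pvNextStop]
  split
  · rename_i h
    split
    · exact le_refl _
    · have h2 := pvNextStop_le words (k+1) (by omega); push_cast at h2; omega
  · omega
termination_by words.length - k

def lastIdxFrom? (p : Int → Bool) (L : Int) : Nat → Option Int
  | 0 => none
  | n+1 => if p (L + n) then some (L + n) else lastIdxFrom? p L n

lemma findBack (p : Int → Bool) (L : Int) : ∀ n : Nat,
    (PySem.List.pyRange (L + n - 1) (L - 1) (-1)).find? p = lastIdxFrom? p L n := by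
  intro n
  induction n with
  | zero => simp [PySem.List.pyRange_neg_one_eq_nil, lastIdxFrom?]
  | succ n ih =>
      have h1 : L + (n+1:Nat) - 1 = L + n := by push_cast; ring
      rw [h1, PySem.List.pyRange_neg_one_cons (by omega), List.find?_cons]
      simp only [lastIdxFrom?]
      split
      · simp_all
      · simp_all

lemma lastIdxFrom?_stop (words : List String) (p : Int → Bool) (c L : Int)
    (hc : 0 ≤ c) (hL : 0 ≤ L) : ∀ n : Nat,
    (∀ i : Int, L ≤ i → i < L + n → p i = pvStop (PySem.List.pyGetD words (c + i) "")) →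
    lastIdxFrom? p L n =
      (if c + L ≤ pvLastStop words (c + L + n).toNat
       then some (pvLastStop words (c + L + n).toNat - c) else none) := by
  intro n
  induction n with
  | zero =>
      intro _
      have h := pvLastStop_lt words (c + L).toNat
      simp only [lastIdxFrom?, Nat.cast_zero, add_zero]
      rw [if_neg (by omega)]
  | succ n ih =>
      intro hp
      have hK : (c + L + (n+1:Nat)).toNat = (c + L + n).toNat + 1 := by push_cast; omega
      rw [hK]
      simp only [lastIdxFrom?, pvLastStop]
      have hidx : ((c + L + n).toNat : Int) = c + (L + n) := by omega
      rw [hidx, ← hp (L + n) (by omega) (by omega)]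
      by_cases hps : p (L + n) = true
      · rw [if_pos hps, if_pos hps, if_pos (by omega)]
        congr 1; omega
      · rw [if_neg hps, if_neg hps, ih (fun i h1 h2 => hp i h1 (by push_cast at h2 ⊢; omega))]

def firstIdxFrom? (p : Int → Bool) : Nat → Int → Option Int
  | 0, _ => none
  | n+1, a => if p a then some a else firstIdxFrom? p n (a+1)

lemma findFwd (p : Int → Bool) : ∀ (n : Nat) (a : Int),
    (PySem.List.pyRange a (a + n) 1).find? p = firstIdxFrom? p n a := by
  intro n
  induction n with
  | zero => intro a; simp [PySem.List.pyRange_one_eq_nil, firstIdxFrom?]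
  | succ n ih =>
      intro a
      rw [PySem.List.pyRange_one_cons (by omega), List.find?_cons]
      simp only [firstIdxFrom?]
      by_cases hps : p a = true
      · simp [hps]
      · simp only [hps, Bool.false_eq_true, if_false]
        rw [show a + ((n+1:Nat):Int) = (a+1) + (n:Nat) by push_cast; ring]
        exact ih (a+1)

lemma firstIdxFrom?_stop (words : List String) (p : Int → Bool) : ∀ (n k : Nat),
    k + n ≤ words.length →
    (∀ i : Int, (k : Int) ≤ i → i < (k : Int) + n → p i = pvStop (PySem.List.pyGetD words i "")) →
    firstIdxFrom? p n k =
      (if pvNextStop words k < (k : Int) + n then some (pvNextStop words k) else none) := by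
  intro n
  induction n with
  | zero =>
      intro k hk _
      have := pvNextStop_le words k (by omega)
      simp only [firstIdxFrom?]
      rw [if_neg (by push_cast; omega)]
  | succ n ih =>
      intro k hk hp
      simp only [firstIdxFrom?]
      rw [pvNextStop, dif_pos (by omega), ← hp k (by omega) (by push_cast; omega)]
      split
      · rw [if_pos (by push_cast; omega)]
      · rw [show ((k:Int) + 1) = ((k+1 : Nat) : Int) by push_cast; ring,
            ih (k+1) (by omega) (fun i h1 h2 => hp i (by push_cast at h1 ⊢; omega) (by push_cast at h2 ⊢; omega))]
        congr 1
        · simp only [eq_iff_iff]; constructor <;> intro <;> push_cast at * <;> omega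

-- pvLastStop only inspects indices < k, so it ignores an appended element
lemma pvLastStop_append (ws : List String) (w : String) :
    ∀ k : Nat, k ≤ ws.length → pvLastStop (ws ++ [w]) k = pvLastStop ws k := by
  intro k
  induction k with
  | zero => intro _; rfl
  | succ k ih =>
      intro hk
      simp only [pvLastStop]
      rw [PySem.List.pyGetD_natCast, PySem.List.pyGetD_natCast,
        List.getD_append _ _ _ _ (by omega), ih (by omega)]

lemma prevAux (words : List String) :
    ((PySem.List.enumerate words 0).foldl
      (fun (st : Int × List Int) iw =>
        let last := if pvStop iw.2 then iw.1 else st.1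
        (last, st.2 ++ [last]))
      (-1, [])) =
    (pvLastStop words words.length,
      (List.range words.length).map (fun k => pvLastStop words (k+1))) := by
  induction words using List.reverseRecOn with
  | nil => rfl
  | append_singleton ws w ih =>
      rw [PySem.List.enumerate_append, List.foldl_append, ih]
      simp only [PySem.List.enumerate_cons, PySem.List.enumerate_nil, List.foldl_cons, List.foldl_nil]
      have hget : pvStop (PySem.List.pyGetD (ws ++ [w]) ((ws.length:Int)) "") = pvStop w := by
        rw [PySem.List.pyGetD_natCast]
        simp
      have hlast : pvLastStop (ws ++ [w]) (ws.length + 1)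
          = if pvStop w then (ws.length : Int) else pvLastStop ws ws.length := by
        simp only [pvLastStop]
        rw [hget, pvLastStop_append ws w ws.length le_rfl]
      have hmap : List.map (fun k => pvLastStop (ws ++ [w]) (k+1)) (List.range ws.length)
          = List.map (fun k => pvLastStop ws (k+1)) (List.range ws.length) :=
        List.map_congr_left (fun k hk => pvLastStop_append ws w (k+1) (by simp at hk; omega))
      simp [List.range_succ, hlast, hmap]

lemma prevTable_eq (words : List String) :
    pvPrevTable words = (List.range words.length).map (fun k => pvLastStop words (k+1)) := by
  unfold pvPrevTable
  rw [prevAux]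

lemma nxtAux (words : List String) : ∀ (m : Nat), m ≤ words.length → ∀ acc : List Int,
    (PySem.List.pyRange ((m:Int) - 1) (-1) (-1)).foldl
      (fun (st : Int × List Int) i =>
        let nx := if pvStop (PySem.List.pyGetD words i "") then i else st.1
        (nx, st.2 ++ [nx]))
      (pvNextStop words m, acc)
    = (pvNextStop words 0, acc ++ ((List.range m).reverse.map (fun k => pvNextStop words k))) := by
  intro m
  induction m with
  | zero => intro _ acc; rw [PySem.List.pyRange_neg_one_eq_nil (by omega)]; simp
  | succ m ih =>
      intro hm acc
      rw [show ((m+1:Nat):Int) - 1 = (m:Int) by push_cast; ring,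
          PySem.List.pyRange_neg_one_cons (by omega), List.foldl_cons]
      have hstep : (if pvStop (PySem.List.pyGetD words (m:Int) "") then (m:Int) else pvNextStop words (m+1))
          = pvNextStop words m := by
        conv_rhs => rw [pvNextStop]
        rw [dif_pos (by omega)]
      simp only []
      rw [hstep, ih (by omega)]
      simp [List.range_succ]

lemma nxtTable_eq (words : List String) :
    pvNxtTable words = (List.range words.length).map (fun k => pvNextStop words k) := by
  unfold pvNxtTable
  simp only []
  have hinit : ((words.length : Int), ([] : List Int))
      = (pvNextStop words words.length, ([] : List Int)) := by
    rw [pvNextStop, dif_neg (by omega)]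
  rw [hinit, nxtAux words words.length le_rfl []]
  simp [List.map_reverse]

lemma prev_getD (words : List String) (i : Int) (h0 : 0 ≤ i) (h1 : i < (words.length : Int)) :
    PySem.List.pyGetD (pvPrevTable words) i 0 = pvLastStop words (i.toNat + 1) := by
  rw [show i = ((i.toNat : Nat) : Int) by omega, PySem.List.pyGetD_natCast, prevTable_eq,
    PySem.List.getD_map_range _ _ _ _ (by omega)]
  congr 1

lemma nxt_getD (words : List String) (i : Int) (h0 : 0 ≤ i) (h1 : i < (words.length : Int)) :
    PySem.List.pyGetD (pvNxtTable words) i 0 = pvNextStop words i.toNat := by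
  rw [show i = ((i.toNat : Nat) : Int) by omega, PySem.List.pyGetD_natCast, nxtTable_eq,
    PySem.List.getD_map_range _ _ _ _ (by omega)]
  congr 1

lemma loop_eq (words : List String) (max_len : Int) (h1 : 1 ≤ max_len)
    (hlt : max_len < (words.length : Int)) : ∀ (fuel : Nat) (start : Int) (result : List String),
    0 ≤ start →
    pvAloop words (words.length : Int) max_len fuel start result =
      pvBloop words (pvPrevTable words) (pvNxtTable words) (words.length : Int) max_len fuel start result := by
  intro fuel
  induction fuel with
  | zero => intro start result _; rfl
  | succ fuel ih =>
      intro start result h0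
      rw [pvAloop, pvBloop]
      by_cases hs : start < (words.length : Int)
      case neg => rw [if_neg hs, if_neg hs]
      rw [if_pos hs, if_pos hs]
      by_cases hfin : (words.length : Int) - start < max_len
      case pos =>
        rw [if_pos hfin, if_pos hfin]
        simp only []
        rw [nxt_getD words _ (by omega) (by omega)]
        set ideal : Int := (words.length : Int) - max_len with hideal
        set n : Nat := (min (words.length : Int) (ideal + 200) - ideal).toNat with hn
        have hmin : min (words.length : Int) (ideal + 200) = ideal + (n : Int) := by omega
        have hfind : List.find? (fun i => pvStop (PySem.List.pyGetD words i ""))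
            (PySem.List.pyRange ideal (min (words.length : Int) (ideal + 200)))
            = if pvNextStop words ideal.toNat < (ideal.toNat : Int) + n
              then some (pvNextStop words ideal.toNat) else none := by
          rw [hmin, show ideal = ((ideal.toNat : Nat) : Int) by omega, findFwd,
            firstIdxFrom?_stop words _ n ideal.toNat (by omega) (fun i _ _ => rfl)]
          simp [show max ideal 0 = ideal by omega]
        rw [hfind]
        have hu1 := pvNextStop_le words ideal.toNat (by omega)
        by_cases hc : pvNextStop words ideal.toNat < (ideal.toNat : Int) + n
        · rw [if_pos hc]
          rw [if_pos (show pvNextStop words ideal.toNat < min ((words.length:Nat) : Int) (ideal + 200) by omega)]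
          have hb : ((pvNextStop words ideal.toNat + 1 != -1)) = true := by
            simp only [bne_iff_ne]; omega
          rw [if_pos hb]
        · rw [if_neg hc]
          rw [if_neg (show ¬ pvNextStop words ideal.toNat < min ((words.length:Nat) : Int) (ideal + 200) by omega)]
          simp only [bne_self_eq_false, Bool.false_eq_true, if_false]
          have hsl : PySem.List.slice words (some (-max_len)) none
              = PySem.List.slice words (some ideal) none := by
            rw [PySem.List.slice_some_none, PySem.List.slice_some_none]
            congr 1
            rw [show -max_len = -((max_len.toNat : Nat) : Int) by omega,
              PySem.List.clampIdx_neg_natCast _ _ (by omega),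
              show ideal = (((words.length - max_len.toNat : Nat)) : Int) by omega,
              PySem.List.clampIdx_natCast]
            omega
          rw [hsl]
      case neg =>
        rw [if_neg hfin, if_neg hfin]
        simp only []
        rw [prev_getD words _ (by omega) (by omega)]
        set W : Nat := (min max_len 200).toNat with hWdef
        set L : Int := max_len - W with hLdef
        have hL0 : 0 ≤ L := by omega
        have hchunklen : (((PySem.List.slice words (some start) (some (start + max_len))).length : Nat) : Int) = max_len := by
          rw [PySem.List.slice_toNat _ h0 (by omega)]
          simp
          omega
        have hget : ∀ i : Int, 0 ≤ i → i < max_len →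
            PySem.List.pyGetD (PySem.List.slice words (some start) (some (start + max_len))) i ""
            = PySem.List.pyGetD words (start + i) "" := by
          intro i hi0 hi1
          rw [PySem.List.slice_toNat _ h0 (by omega),
            PySem.List.pyGetD_eq_getElem _ _ hi0 (by rw [List.length_take, List.length_drop]; push_cast; omega),
            PySem.List.pyGetD_eq_getElem _ _ (by omega) (by omega)]
          rw [List.getElem_take, List.getElem_drop]
          congr 1
          omega
        have hfind : List.find? (fun i => pvStop (PySem.List.pyGetD
              (PySem.List.slice words (some start) (some (start + max_len))) i ""))
            (PySem.List.pyRange (((PySem.List.slice words (some start) (some (start + max_len))).length : Int) - 1)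
              (max (-1) (((PySem.List.slice words (some start) (some (start + max_len))).length : Int) - 1 - 200)) (-1))
            = if start + L ≤ pvLastStop words (start + L + W).toNat
              then some (pvLastStop words (start + L + W).toNat - start) else none := by
          rw [show (((PySem.List.slice words (some start) (some (start + max_len))).length : Int) - 1) = L + (W : Int) - 1 by omega,
            show (max (-1) (L + (W : Int) - 1 - 200)) = L - 1 by omega,
            findBack,
            lastIdxFrom?_stop words _ start L h0 hL0 W
              (fun i hi1 hi2 => by rw [hget i (by omega) (by omega)])]
        rw [hfind]
        have hvidx : (start + L + (W : Int)).toNat = (start + max_len - 1).toNat + 1 := by omega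
        rw [hvidx]
        have hvlt := pvLastStop_lt words ((start + max_len - 1).toNat + 1)
        by_cases hv : start + L ≤ pvLastStop words ((start + max_len - 1).toNat + 1)
        · rw [if_pos hv]
          rw [if_pos (show start + max 0 (max_len - 200) ≤ pvLastStop words ((start + max_len - 1).toNat + 1) by omega)]
          have hb : ((pvLastStop words ((start + max_len - 1).toNat + 1) - start != -1)) = true := by
            simp only [bne_iff_ne]; omega
          rw [if_pos hb]
          rw [show start + (pvLastStop words ((start + max_len - 1).toNat + 1) - start) + 1
              = pvLastStop words ((start + max_len - 1).toNat + 1) + 1 by ring]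
          exact ih _ _ (by omega)
        · rw [if_neg hv]
          rw [if_neg (show ¬ start + max 0 (max_len - 200) ≤ pvLastStop words ((start + max_len - 1).toNat + 1) by omega)]
          simp only [bne_self_eq_false, Bool.false_eq_true, if_false]
          exact ih _ _ (by omega)

-- ===== VERDICT (by name: the statement is the Claim_ definition above) =====
theorem smart_split_text_spec : Claim_equal_smart_split_text := by
  intro text max_len _ hpre
  unfold Spec_smart_split_text smart_split_text smart_split_text_alt
  simp only []
  by_cases hle : (((PySem.Str.split₀ text).length : Nat) : Int) ≤ max_len
  · rw [if_pos hle, if_pos hle]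
  · rw [if_neg hle, if_neg hle]
    rcases hpre with hml | hsh | hnil
    · exact loop_eq (PySem.Str.split₀ text) max_len hml (by omega) ((PySem.Str.split₀ text).length + 1) 0 [] le_rfl
    · exact absurd hsh hle
    · rw [hnil]
      rfl
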